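-- pv_equiv track=rewrite | github.com/ABHISHEK1139/IND-Diplomat | engine/Layer2_Knowledge/signal_extraction/legal_signal_extractor/signals.py | choose_primary_signal
-- ===== SOURCE A (Python) =====
-- from typing import Any, Dict, List
--
-- SIGNAL_PRIORITY: List[str] = [
--     "PROHIBITION",
--     "OBLIGATION",
--     "PERMISSION",
--     "JUSTIFICATION",
--     "LOOPHOLE",
-- ]
--
-- def choose_primary_signal(hits: List[Dict[str, Any]]) -> str:
--     """
--     Pick a primary signal using fixed legal priority order.
--     """
--     if not hits:
--         return "NONE"
--
--     seen = {hit["type"] for hit in hits}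
--     for signal_type in SIGNAL_PRIORITY:
--         if signal_type in seen:
--             return signal_type
--     return hits[0]["type"]
-- ===== SOURCE B (Python) =====
-- from typing import Any, Dict, List
--
-- SIGNAL_PRIORITY: List[str] = [
--     "PROHIBITION",
--     "OBLIGATION",
--     "PERMISSION",
--     "JUSTIFICATION",
--     "LOOPHOLE",
-- ]
--
-- _RANK: Dict[str, int] = {s: i for i, s in enumerate(SIGNAL_PRIORITY)}
--
-- def choose_primary_signal(hits: List[Dict[str, Any]]) -> str:
--     """
--     Pick a primary signal using fixed legal priority order.
--     """
--     if not hits: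
--         return "NONE"
--
--     best = None
--     for hit in hits:
--         r = _RANK.get(hit["type"])
--         if r is not None and (best is None or r < best):
--             best = r
--     if best is not None:
--         return SIGNAL_PRIORITY[best]
--     return hits[0]["type"]
-- ===== Notes on version B (the rewrite author's own statement) =====
-- stated objective: alternative
-- what changed: Instead of building a set of hit types and scanning the priority list for the first member, B precomputes a rank dict and makes one pass over the hits tracking the minimum rank, indexing back into SIGNAL_PRIORITY.
import Mathlib
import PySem

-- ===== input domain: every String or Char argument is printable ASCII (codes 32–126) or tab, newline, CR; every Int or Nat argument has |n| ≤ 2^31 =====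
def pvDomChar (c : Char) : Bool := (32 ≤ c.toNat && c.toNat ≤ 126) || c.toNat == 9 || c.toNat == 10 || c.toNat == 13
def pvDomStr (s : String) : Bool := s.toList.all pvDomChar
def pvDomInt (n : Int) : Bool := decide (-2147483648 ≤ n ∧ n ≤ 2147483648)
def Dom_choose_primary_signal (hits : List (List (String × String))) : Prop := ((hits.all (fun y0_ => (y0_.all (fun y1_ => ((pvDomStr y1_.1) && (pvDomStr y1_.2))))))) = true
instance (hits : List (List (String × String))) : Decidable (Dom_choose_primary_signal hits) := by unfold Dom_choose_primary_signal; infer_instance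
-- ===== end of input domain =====

set_option maxHeartbeats 1000000


-- B replaces A's "build the set of hit types, scan the priority list for the first member"
-- by one pass over the hits tracking the minimum priority rank (via a precomputed rank dict).

-- ===== PORT A =====
def SIGNAL_PRIORITY : List String :=
  ["PROHIBITION", "OBLIGATION", "PERMISSION", "JUSTIFICATION", "LOOPHOLE"]

-- hit["type"] (first-match lookup in the association list; Pre_ guarantees the key exists)
def hitType (h : List (String × String)) : String :=
  ((PySem.Dict.mk h).get? "type").getD ""

def choose_primary_signal (hits : List (List (String × String))) : String :=
  if hits.isEmpty then "NONE"
  else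
    let seen : PySem.Set String := PySem.Set.ofList (hits.map hitType)
    match SIGNAL_PRIORITY.find? (fun s => seen.contains s) with
    | some s => s
    | none => hitType (hits.headD [])

-- ===== PORT B =====
-- _RANK = {s: i for i, s in enumerate(SIGNAL_PRIORITY)}
def RANK : PySem.Dict String Int :=
  (PySem.List.enumerate SIGNAL_PRIORITY 0).foldl (fun d p => d.insert p.2 p.1) PySem.Dict.empty

def bStep (best : Option Int) (h : List (String × String)) : Option Int :=
  match RANK.get? (hitType h) with
  | none => best
  | some r =>
    match best with
    | none => some r
    | some b => if r < b then some r else best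

def choose_primary_signal_alt (hits : List (List (String × String))) : String :=
  if hits.isEmpty then "NONE"
  else
    match hits.foldl bStep none with
    | some b => (PySem.List.pyGet? SIGNAL_PRIORITY b).getD ""
    | none => hitType (hits.headD [])

-- ===== PRECONDITION & SPEC =====
-- Pre_ excludes hits that lack a "type" key, on which A raises KeyError.
def Pre_choose_primary_signal (hits : List (List (String × String))) : Prop :=
  ∀ h ∈ hits, ((PySem.Dict.mk h).get? "type").isSome
instance (hits : List (List (String × String))) : Decidable (Pre_choose_primary_signal hits) := by unfold Pre_choose_primary_signal; infer_instance
def pvWitness_choose_primary_signal : (List (List (String × String))) :=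
  [[("type", "LOOPHOLE")], [("type", "OBLIGATION")], [("type", "foo")]]

def Spec_choose_primary_signal (hits : List (List (String × String))) (out : String) : Prop := out = choose_primary_signal_alt hits
instance (hits : List (List (String × String))) (out : String) : Decidable (Spec_choose_primary_signal hits out) := by unfold Spec_choose_primary_signal; infer_instance

-- ===== CLAIM (what is proved, stated in full; the proofs are below) =====
def Claim_equal_choose_primary_signal : Prop := ∀ (hits : List (List (String × String))), Dom_choose_primary_signal hits → Pre_choose_primary_signal hits → Spec_choose_primary_signal hits (choose_primary_signal hits)

-- ===== LEMMAS AND PROOFS =====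

-- rank lookup characterized as nested ifs
theorem rank_get (t : String) :
    RANK.get? t =
      if t = "PROHIBITION" then some 0
      else if t = "OBLIGATION" then some 1
      else if t = "PERMISSION" then some 2
      else if t = "JUSTIFICATION" then some 3
      else if t = "LOOPHOLE" then some 4
      else none := by
  have h : RANK = PySem.Dict.mk [("PROHIBITION", 0), ("OBLIGATION", 1), ("PERMISSION", 2),
      ("JUSTIFICATION", 3), ("LOOPHOLE", 4)] := by decide
  rw [h]
  simp only [PySem.Dict.get?_mk_cons, beq_iff_eq]
  have he : (PySem.Dict.mk ([] : List (String × Int))).get? t = none := rfl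
  rw [he]
  simp [eq_comm]

-- the "first priority present in ts" index
def idxFind (ts : List String) : Option Int :=
  if ts.contains "PROHIBITION" then some 0
  else if ts.contains "OBLIGATION" then some 1
  else if ts.contains "PERMISSION" then some 2
  else if ts.contains "JUSTIFICATION" then some 3
  else if ts.contains "LOOPHOLE" then some 4
  else none

def omin : Option Int → Option Int → Option Int
  | none, b => b
  | a, none => a
  | some x, some y => some (min x y)

theorem bStep_eq (best : Option Int) (h : List (String × String)) :
    bStep best h = omin best (RANK.get? (hitType h)) := by
  unfold bStep
  cases hr : RANK.get? (hitType h) <;> cases best <;>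
    simp [omin, min_def] <;> split_ifs <;> simp <;> omega

theorem omin_assoc (a b c : Option Int) : omin (omin a b) c = omin a (omin b c) := by
  cases a <;> cases b <;> cases c <;> simp [omin] <;> omega

theorem foldl_bStep (ts : List (List (String × String))) (acc : Option Int) :
    ts.foldl bStep acc = omin acc (ts.foldl bStep none) := by
  induction ts generalizing acc with
  | nil => cases acc <;> simp [omin]
  | cons t ts ih =>
    simp only [List.foldl_cons]
    rw [ih, ih (bStep none t), bStep_eq, bStep_eq, omin_assoc]
    simp [omin]

theorem idxFind_cons (t : List (String × String)) (ts : List (List (String × String))) :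
    omin (RANK.get? (hitType t)) (idxFind (ts.map hitType)) = idxFind ((t :: ts).map hitType) := by
  rw [rank_get]
  simp only [List.map_cons]
  split_ifs <;>
    simp only [idxFind, List.contains_cons, beq_iff_eq] <;>
    simp_all <;> split_ifs <;> simp_all [omin, min_def, eq_comm] <;> tauto

theorem fold_eq_idxFind (ts : List (List (String × String))) :
    ts.foldl bStep none = idxFind (ts.map hitType) := by
  induction ts with
  | nil => simp [idxFind]
  | cons t ts ih =>
    rw [List.foldl_cons, foldl_bStep, bStep_eq]
    have hn : omin none (RANK.get? (hitType t)) = RANK.get? (hitType t) := rfl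
    rw [hn, ih, idxFind_cons]

theorem set_contains (ts : List String) (s : String) :
    (PySem.Set.ofList ts).contains s = ts.contains s := by
  simp [PySem.Set.contains, PySem.Set.mem_ofList]

theorem find_eq (ts : List String) (d : String) :
    (match idxFind ts with
     | some b => (PySem.List.pyGet? SIGNAL_PRIORITY b).getD ""
     | none => d)
    = (match SIGNAL_PRIORITY.find? (fun s => ts.contains s) with
       | some s => s
       | none => d) := by
  unfold idxFind SIGNAL_PRIORITY
  by_cases c0 : ts.contains "PROHIBITION" <;>
  by_cases c1 : ts.contains "OBLIGATION" <;>
  by_cases c2 : ts.contains "PERMISSION" <;>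
  by_cases c3 : ts.contains "JUSTIFICATION" <;>
  by_cases c4 : ts.contains "LOOPHOLE" <;>
    simp only [List.find?_cons, c0, c1, c2, c3, c4, if_true] <;> rfl

-- ===== VERDICT (by name: the statement is the Claim_ definition above) =====
theorem choose_primary_signal_spec : Claim_equal_choose_primary_signal := by
  intro hits _ _
  unfold Spec_choose_primary_signal choose_primary_signal choose_primary_signal_alt
  by_cases he : hits.isEmpty
  · simp [he]
  · simp only [he, Bool.false_eq_true, if_false]
    rw [fold_eq_idxFind]
    have hc : (fun s => (PySem.Set.ofList (hits.map hitType)).contains s)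
        = (fun s => (hits.map hitType).contains s) := funext (set_contains _)
    rw [hc]
    exact (find_eq (hits.map hitType) (hitType (hits.headD []))).symm
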